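-- pv_equiv track=rewrite | github.com/lusca01/Varredura-de-Dispositivo | tcc.py | contaRank
-- ===== SOURCE A (Python) =====
-- def contaRank(teste):
--     low = 0
--     medium = 0
--     high = 0
--     critic = 0
--     for aux in teste:
--         if aux == 'LOW':
--             low += 1
--         if aux == 'MEDIUM':
--             medium += 1
--         if aux == 'HIGH':
--             high += 1
--         if aux == 'CRITIC':
--             critic += 1
--     priority = [low, medium, high, critic]
--     return priority
-- ===== SOURCE B (Python) =====
-- def contaRank(teste):
--     return [teste.count('LOW'), teste.count('MEDIUM'),
--             teste.count('HIGH'), teste.count('CRITIC')]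
-- ===== Notes on version B (the rewrite author's own statement) =====
-- stated objective: idiomatic
-- what changed: Replaces the single pass maintaining four accumulators with four independent list.count scans, one per label.
import Mathlib
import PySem

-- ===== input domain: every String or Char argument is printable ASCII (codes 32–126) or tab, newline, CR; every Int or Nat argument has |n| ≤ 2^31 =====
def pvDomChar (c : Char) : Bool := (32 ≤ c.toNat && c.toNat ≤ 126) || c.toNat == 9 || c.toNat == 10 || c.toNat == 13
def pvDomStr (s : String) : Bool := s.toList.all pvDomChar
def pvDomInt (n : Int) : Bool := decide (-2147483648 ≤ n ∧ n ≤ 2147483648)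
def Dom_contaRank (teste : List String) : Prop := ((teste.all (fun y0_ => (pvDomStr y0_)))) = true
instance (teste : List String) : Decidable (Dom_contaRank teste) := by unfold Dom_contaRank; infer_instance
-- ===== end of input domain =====

-- ===== PORT A =====
-- Port of A: one fold over the list maintaining four counters (low, medium, high, critic).
def contaRank (teste : List String) : List Int :=
  let s := teste.foldl (fun (acc : Int × Int × Int × Int) aux =>
    let (low, medium, high, critic) := acc
    let low := if aux == "LOW" then low + 1 else low
    let medium := if aux == "MEDIUM" then medium + 1 else medium
    let high := if aux == "HIGH" then high + 1 else high
    let critic := if aux == "CRITIC" then critic + 1 else critic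
    (low, medium, high, critic)) (0, 0, 0, 0)
  [s.1, s.2.1, s.2.2.1, s.2.2.2]

-- ===== PORT B =====
-- Port of B: four independent list.count scans.
def contaRank_alt (teste : List String) : List Int :=
  [PySem.List.count teste "LOW", PySem.List.count teste "MEDIUM",
   PySem.List.count teste "HIGH", PySem.List.count teste "CRITIC"]

-- ===== PRECONDITION & SPEC =====
def Spec_contaRank (teste : List String) (out : List Int) : Prop := out = contaRank_alt teste
instance (teste : List String) (out : List Int) : Decidable (Spec_contaRank teste out) := by unfold Spec_contaRank; infer_instance

-- ===== CLAIM (what is proved, stated in full; the proofs are below) =====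
def Claim_equal_contaRank : Prop := ∀ (teste : List String), Dom_contaRank teste → Spec_contaRank teste (contaRank teste)

-- ===== LEMMAS AND PROOFS =====

-- ===== VERDICT (by name: the statement is the Claim_ definition above) =====
theorem contaRank_fold (teste : List String) (l m h c : Int) :
    teste.foldl (fun (acc : Int × Int × Int × Int) aux =>
      let (low, medium, high, critic) := acc
      let low := if aux == "LOW" then low + 1 else low
      let medium := if aux == "MEDIUM" then medium + 1 else medium
      let high := if aux == "HIGH" then high + 1 else high
      let critic := if aux == "CRITIC" then critic + 1 else critic
      (low, medium, high, critic)) (l, m, h, c)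
    = (l + PySem.List.count teste "LOW", m + PySem.List.count teste "MEDIUM",
       h + PySem.List.count teste "HIGH", c + PySem.List.count teste "CRITIC") := by
  induction teste generalizing l m h c with
  | nil => simp [PySem.List.count]
  | cons x xs ih =>
    simp only [List.foldl_cons, ih, PySem.List.count, List.count_cons, Prod.mk.injEq]
    split_ifs <;> and_intros <;> push_cast <;> omega

theorem contaRank_spec : Claim_equal_contaRank := by
  intro teste _
  unfold Spec_contaRank contaRank contaRank_alt
  simp only [contaRank_fold]
  norm_num
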